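-- pv_equiv track=rewrite | github.com/Ravurisomasekhar/Python-OOP | leastFrequentLetters-handout/leastFrequentLetters-handout/leastFrequentLetters.py | leastFrequentLetters
-- ===== SOURCE A (Python) =====
-- def leastFrequentLetters(s):
--     s = s.lower()
--     freq = {}
--
--     for ch in s:
--         if ch.isalpha():
--             if ch in freq:
--                 freq[ch] += 1
--             else:
--                 freq[ch] = 1
--
--     if not freq:
--         return ""
--
--
--     min_count = None
--     for v in freq.values():
--         if min_count is None or v < min_count:
--             min_count = v
--
--
--     result = ""
--     for ch in "abcdefghijklmnopqrstuvwxyz":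
--         if ch in freq and freq[ch] == min_count:
--             result += ch
--
--     return result
-- ===== SOURCE B (Python) =====
-- def leastFrequentLetters(s):
--     letters = sorted(ch for ch in s.lower() if ch.isalpha())
--
--     def runs(lst):
--         # sorted input: each letter forms one contiguous run
--         if not lst:
--             return []
--         head = lst[0]
--         i = 1
--         while i < len(lst) and lst[i] == head:
--             i += 1
--         return [(head, i)] + runs(lst[i:])
--
--     groups = runs(letters)
--     if not groups:
--         return ""
--     m = min(n for _, n in groups)
--     return "".join(c for c, n in groups if n == m)
-- ===== Notes on version B (the rewrite author's own statement) =====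
-- stated objective: alternative
-- what changed: Replaces A's frequency dict + minimum-of-values loop + a-to-z membership scan by sort-then-scan: sort the alpha letters, group the sorted list into contiguous runs, take the minimum run length and emit the heads of the minimal runs (already in alphabetical order because the list is sorted).
import Mathlib
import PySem

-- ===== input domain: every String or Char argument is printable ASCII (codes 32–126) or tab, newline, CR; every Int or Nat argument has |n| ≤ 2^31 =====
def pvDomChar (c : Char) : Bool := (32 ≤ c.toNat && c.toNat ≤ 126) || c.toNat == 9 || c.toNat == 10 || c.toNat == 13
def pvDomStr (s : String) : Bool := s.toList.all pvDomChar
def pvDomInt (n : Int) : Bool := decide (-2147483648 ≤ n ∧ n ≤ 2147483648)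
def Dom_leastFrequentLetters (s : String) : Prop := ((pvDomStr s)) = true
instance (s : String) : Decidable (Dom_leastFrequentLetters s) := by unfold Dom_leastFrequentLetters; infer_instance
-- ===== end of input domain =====

-- B replaces A's frequency dict and alphabet membership scan by sort-then-run-length-scan:
-- it sorts the alpha letters, groups the sorted list into runs, and keeps the shortest runs
-- (objective: alternative — a different algorithm of similar cost).

-- ===== PORT A =====
def leastFrequentLetters (s : String) : String :=
  let t := PySem.Chars.lower s.toList
  let freq : PySem.Dict Char Int :=
    t.foldl (fun d ch =>
      if PySem.Chars.isalpha ch then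
        if d.contains ch then d.insert ch (d.getD ch 0 + 1) else d.insert ch 1
      else d) PySem.Dict.empty
  if freq.items.isEmpty then ""
  else
    let minCount : Option Int :=
      freq.values.foldl (fun m v =>
        match m with
        | none => some v
        | some mc => if v < mc then some v else some mc) none
    let result : List Char :=
      "abcdefghijklmnopqrstuvwxyz".toList.foldl (fun r ch =>
        if freq.contains ch && (some (freq.getD ch 0) == minCount) then r ++ [ch] else r) []
    String.ofList result

-- ===== PORT B =====
-- helper `runs` of Source B: the while loop computes i = 1 + length of the prefix of `rest`
-- equal to `head` (ported as takeWhile, exact here), and lst[i:] is a nonnegative slice.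
def pvRuns (lst : List Char) : List (Char × Int) :=
  match lst with
  | [] => []
  | head :: rest =>
    let i : Nat := (rest.takeWhile (fun x => x == head)).length + 1
    [(head, (i : Int))] ++ pvRuns (PySem.List.slice (head :: rest) (some (i : Int)) none)
termination_by lst.length
decreasing_by
  simp only [PySem.List.slice_from_natCast, List.length_drop, List.length_cons]
  omega

def leastFrequentLetters_alt (s : String) : String :=
  let letters := PySem.List.sorted ((PySem.Chars.lower s.toList).filter PySem.Chars.isalpha) (fun x => x) false
  let groups := pvRuns letters
  if groups.isEmpty then ""
  else
    match PySem.List.min? (groups.map Prod.snd) (fun x => x) with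
    | none => ""
    | some m => String.ofList ((groups.filter (fun p => p.2 == m)).map Prod.fst)

-- ===== PRECONDITION & SPEC =====
def Spec_leastFrequentLetters (s : String) (out : String) : Prop := out = leastFrequentLetters_alt s
instance (s : String) (out : String) : Decidable (Spec_leastFrequentLetters s out) := by unfold Spec_leastFrequentLetters; infer_instance

-- ===== CLAIM (what is proved, stated in full; the proofs are below) =====
def Claim_equal_leastFrequentLetters : Prop := ∀ (s : String), Dom_leastFrequentLetters s → Spec_leastFrequentLetters s (leastFrequentLetters s)

-- ===== LEMMAS AND PROOFS =====

-- a loop that skips elements failing p is a loop over the filtered list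
theorem pv_foldl_if_filter {α β : Type} (p : α → Bool) (f : β → α → β) (l : List α) (init : β) :
    l.foldl (fun d x => if p x then f d x else d) init = (l.filter p).foldl f init := by
  induction l generalizing init with
  | nil => rfl
  | cons x xs ih => by_cases hx : p x <;> simp [hx, ih]

-- A's counting loop builds Counter(filter isalpha t)
theorem pv_freq_eq (t : List Char) :
    t.foldl (fun d ch =>
      if PySem.Chars.isalpha ch then
        if d.contains ch then d.insert ch (d.getD ch 0 + 1) else d.insert ch 1
      else d) PySem.Dict.empty
      = PySem.Dict.counter (t.filter PySem.Chars.isalpha) := by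
  rw [pv_foldl_if_filter]
  have hstep : (fun (d : PySem.Dict Char Int) ch =>
      if d.contains ch then d.insert ch (d.getD ch 0 + 1) else d.insert ch 1)
      = fun d ch => d.insert ch (d.getD ch 0 + 1) := by
    funext d ch
    by_cases hc : d.contains ch
    · simp [hc]
    · simp only [Bool.not_eq_true] at hc
      rw [PySem.Dict.getD_of_not_contains d 0 hc]
      simp [hc]
  rw [hstep, PySem.Dict.foldl_insert_getD_add_one_eq_counter]

-- Char facts used below
theorem pv_char_le (a b : Char) : a ≤ b ↔ a.toNat ≤ b.toNat := by
  rw [Char.le_def, UInt32.le_iff_toNat_le]; rfl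

theorem pv_toNat_ofNat (n : Nat) (h : n < 55296) : (Char.ofNat n).toNat = n := by
  unfold Char.ofNat
  rw [dif_pos (Or.inl h)]
  show (Char.ofNatAux n _).val.toNat = n
  simp only [Char.ofNatAux, UInt32.toNat, BitVec.toNat_ofNatLT]

theorem pv_char_eq_ofNat (c : Char) (n : Nat) (h : c.toNat = n) (hn : n < 55296) :
    c = Char.ofNat n := by
  apply Char.ext
  apply UInt32.toNat_inj.mp
  show c.toNat = (Char.ofNat n).toNat
  rw [pv_toNat_ofNat n hn, h]

-- every letter surviving lower + isalpha is one of the 26 lowercase letters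
theorem pv_islower_of_mem_lower (s : List Char) (c : Char)
    (hc : c ∈ PySem.Chars.lower s) (ha : PySem.Chars.isalpha c = true) :
    PySem.Chars.islower c = true := by
  simp only [PySem.Chars.lower, List.mem_map] at hc
  obtain ⟨x, _, rfl⟩ := hc
  simp only [PySem.Chars.lowerChar] at ha ⊢
  by_cases hu : PySem.Chars.isupper x
  · simp only [hu, if_pos] at ha ⊢
    simp only [PySem.Chars.isupper, Bool.and_eq_true, decide_eq_true_eq] at hu
    have h1 : ('A' : Char).toNat ≤ x.toNat := (pv_char_le _ _).mp hu.1
    have h2 : x.toNat ≤ ('Z' : Char).toNat := (pv_char_le _ _).mp hu.2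
    have hA : ('A' : Char).toNat = 65 := by decide
    have hZ : ('Z' : Char).toNat = 90 := by decide
    have htn : (Char.ofNat (x.toNat + 32)).toNat = x.toNat + 32 :=
      pv_toNat_ofNat _ (by omega)
    simp only [PySem.Chars.islower, Bool.and_eq_true, decide_eq_true_eq]
    refine ⟨(pv_char_le _ _).mpr ?_, (pv_char_le _ _).mpr ?_⟩
    · rw [htn]; rw [show ('a' : Char).toNat = 97 from by decide]; omega
    · rw [htn]; rw [show ('z' : Char).toNat = 122 from by decide]; omega
  · simp only [hu, if_neg, Bool.false_eq_true, not_false_iff] at ha ⊢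
    simp only [PySem.Chars.isalpha, Bool.or_eq_true] at ha
    rcases ha with ha | ha
    · exact absurd ha (by simpa using hu)
    · exact ha

theorem pv_islower_mem_alphabet (c : Char) (h : PySem.Chars.islower c = true) :
    c ∈ "abcdefghijklmnopqrstuvwxyz".toList := by
  simp only [PySem.Chars.islower, Bool.and_eq_true, decide_eq_true_eq] at h
  have h1 : ('a' : Char).toNat ≤ c.toNat := (pv_char_le _ _).mp h.1
  have h2 : c.toNat ≤ ('z' : Char).toNat := (pv_char_le _ _).mp h.2
  rw [show ('a' : Char).toNat = 97 from by decide] at h1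
  rw [show ('z' : Char).toNat = 122 from by decide] at h2
  have hc : c = Char.ofNat c.toNat := pv_char_eq_ofNat c c.toNat rfl (by omega)
  rw [hc]
  set n := c.toNat with hn
  interval_cases n <;> decide

theorem pv_mem_alphabet (s : List Char) (c : Char)
    (hc : c ∈ PySem.Chars.lower s) (ha : PySem.Chars.isalpha c = true) :
    c ∈ "abcdefghijklmnopqrstuvwxyz".toList :=
  pv_islower_mem_alphabet c (pv_islower_of_mem_lower s c hc ha)

-- A's min loop IS PySem.List.min? with the identity key
theorem pv_min_fold (xs : List Int) :
    xs.foldl (fun m v =>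
      match m with
      | none => some v
      | some mc => if v < mc then some v else some mc) none
    = PySem.List.min? xs id := by
  unfold PySem.List.min?
  congr 1
  funext m v
  cases m <;> rfl

-- dropping the counted prefix IS dropWhile
theorem pv_drop_takeWhile (p : Char → Bool) (l : List Char) :
    l.drop (l.takeWhile p).length = l.dropWhile p := by
  induction l with
  | nil => rfl
  | cons x xs ih =>
    by_cases hx : p x <;> simp [hx, ih]

-- one unfolding of pvRuns on a cons cell
theorem pv_runs_cons (head : Char) (rest : List Char) :
    pvRuns (head :: rest)
      = (head, (((rest.takeWhile (fun x => x == head)).length + 1 : Nat) : Int))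
        :: pvRuns (rest.dropWhile (fun x => x == head)) := by
  rw [pvRuns.eq_def]
  simp only [PySem.List.slice_from_natCast, List.drop_succ_cons, pv_drop_takeWhile,
    List.singleton_append]

-- the head of dropWhile fails the predicate
theorem pv_dropWhile_head (p : Char → Bool) (l : List Char) (d : Char) (dtl : List Char)
    (h : l.dropWhile p = d :: dtl) : p d = false := by
  induction l with
  | nil => simp at h
  | cons x xs ih =>
    rw [List.dropWhile_cons] at h
    by_cases hx : p x
    · exact ih (by simpa [hx] using h)
    · simp only [hx, if_neg, Bool.false_eq_true, not_false_iff] at h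
      cases h
      simpa using hx

-- the run scan on a sorted list: strictly increasing keys, same membership, run length = count
theorem pv_runs_spec_aux (n : Nat) : ∀ (S : List Char), S.length ≤ n → S.Pairwise (· ≤ ·) →
    ((pvRuns S).map Prod.fst).Pairwise (· < ·)
    ∧ (∀ c : Char, c ∈ (pvRuns S).map Prod.fst ↔ c ∈ S)
    ∧ (∀ p ∈ pvRuns S, p.2 = (S.count p.1 : Int)) := by
  induction n with
  | zero =>
    intro S hlen hs
    cases S with
    | nil =>
      rw [pvRuns.eq_def]
      simp
    | cons head rest => simp at hlen
  | succ n ihn =>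
    intro S hlen hs
    cases S with
    | nil =>
      rw [pvRuns.eq_def]
      simp
    | cons head rest =>
      obtain ⟨hhead, hrest⟩ := List.pairwise_cons.mp hs
      have hsplit : rest.takeWhile (fun x => x == head) ++ rest.dropWhile (fun x => x == head)
          = rest := List.takeWhile_append_dropWhile
      have hdwsub : List.Sublist (rest.dropWhile (fun x => x == head)) rest :=
        List.dropWhile_sublist _
      have hdwpw : (rest.dropWhile (fun x => x == head)).Pairwise (· ≤ ·) :=
        hrest.sublist hdwsub
      have htw_eq : ∀ x ∈ rest.takeWhile (fun x => x == head), x = head := by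
        intro x hx
        have := List.mem_takeWhile_imp hx
        simpa using this
      have hdwlt : ∀ x ∈ rest.dropWhile (fun x => x == head), head < x := by
        rcases hdq : rest.dropWhile (fun x => x == head) with _ | ⟨d, dtl⟩
        · intro x hx; simp at hx
        · have hdne : ¬ (d = head) := by
            have := pv_dropWhile_head _ _ _ _ hdq
            simpa using this
          have hdmem : d ∈ rest := hdwsub.subset (by rw [hdq]; exact List.mem_cons_self)
          have hdlt : head < d := lt_of_le_of_ne (hhead d hdmem) (fun h => hdne h.symm)
          intro x hx
          rcases List.mem_cons.mp hx with rfl | hx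
          · exact hdlt
          · have : d ≤ x := (List.pairwise_cons.mp (hdq ▸ hdwpw)).1 x hx
            exact lt_of_lt_of_le hdlt this
      have hlen' : (rest.dropWhile (fun x => x == head)).length ≤ n := by
        have h1 := hdwsub.length_le
        have h2 : (head :: rest).length = rest.length + 1 := rfl
        omega
      have ih := ihn (rest.dropWhile (fun x => x == head)) hlen' hdwpw
      have htw_count : (rest.takeWhile (fun x => x == head)).count head
          = (rest.takeWhile (fun x => x == head)).length :=
        List.count_eq_length.mpr (fun b hb => (htw_eq b hb).symm)
      have hcount_split : ∀ c : Char, rest.count c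
          = (rest.takeWhile (fun x => x == head)).count c
            + (rest.dropWhile (fun x => x == head)).count c := by
        intro c
        conv_lhs => rw [← hsplit]
        rw [List.count_append]
      have hrest_head : rest.count head = (rest.takeWhile (fun x => x == head)).length := by
        have h0 : (rest.dropWhile (fun x => x == head)).count head = 0 :=
          List.count_eq_zero.mpr (fun hm => absurd (hdwlt head hm) (lt_irrefl head))
        have h1 := hcount_split head
        omega
      have hrest_ne : ∀ c : Char, c ≠ head →
          rest.count c = (rest.dropWhile (fun x => x == head)).count c := by
        intro c hcne
        have h0 : (rest.takeWhile (fun x => x == head)).count c = 0 :=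
          List.count_eq_zero.mpr (fun hmem => hcne (htw_eq c hmem))
        have h1 := hcount_split c
        omega
      have hcount_dw : ∀ c ∈ rest.dropWhile (fun x => x == head),
          (head :: rest).count c = (rest.dropWhile (fun x => x == head)).count c := by
        intro c hc
        have hcne : c ≠ head := fun h => absurd (h ▸ hdwlt c hc) (lt_irrefl head)
        rw [← hrest_ne c hcne]
        have hcne' : ¬ head = c := fun h => hcne h.symm
        simp [hcne']
      rw [pv_runs_cons]
      refine ⟨?_, ?_, ?_⟩
      · rw [List.map_cons, List.pairwise_cons]
        refine ⟨?_, ih.1⟩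
        intro c hc
        exact hdwlt c ((ih.2.1 c).mp hc)
      · intro c
        rw [List.map_cons, List.mem_cons, List.mem_cons, ih.2.1]
        constructor
        · rintro (rfl | hc)
          · exact Or.inl rfl
          · exact Or.inr (hdwsub.subset hc)
        · rintro (rfl | hc)
          · exact Or.inl rfl
          · rw [← hsplit] at hc
            rcases List.mem_append.mp hc with hc | hc
            · exact Or.inl (htw_eq c hc)
            · exact Or.inr hc
      · intro p hp
        rcases List.mem_cons.mp hp with rfl | hp
        · show (((rest.takeWhile (fun x => x == head)).length + 1 : Nat) : Int)
              = ((head :: rest).count head : Int)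
          congr 1
          have h1 : (head :: rest).count head = rest.count head + 1 := by
            simp
          omega
        · have hmem : p.1 ∈ rest.dropWhile (fun x => x == head) :=
            (ih.2.1 p.1).mp (List.mem_map_of_mem hp)
          rw [ih.2.2 p hp, hcount_dw p.1 hmem]

theorem pv_runs_spec (S : List Char) (hs : S.Pairwise (· ≤ ·)) :
    ((pvRuns S).map Prod.fst).Pairwise (· < ·)
    ∧ (∀ c : Char, c ∈ (pvRuns S).map Prod.fst ↔ c ∈ S)
    ∧ (∀ p ∈ pvRuns S, p.2 = (S.count p.1 : Int)) :=
  pv_runs_spec_aux S.length S le_rfl hs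

-- two strictly increasing lists with the same members are equal
theorem pv_sorted_ext (l1 l2 : List Char) (h1 : l1.Pairwise (· < ·)) (h2 : l2.Pairwise (· < ·))
    (hm : ∀ c, c ∈ l1 ↔ c ∈ l2) : l1 = l2 := by
  induction l1 generalizing l2 with
  | nil =>
    cases l2 with
    | nil => rfl
    | cons y ys => exact absurd ((hm y).mpr List.mem_cons_self) (List.not_mem_nil)
  | cons x xs ih =>
    cases l2 with
    | nil => exact absurd ((hm x).mp List.mem_cons_self) (List.not_mem_nil)
    | cons y ys =>
      obtain ⟨hx1, hxs1⟩ := List.pairwise_cons.mp h1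
      obtain ⟨hy2, hys2⟩ := List.pairwise_cons.mp h2
      have hxy : x = y := by
        rcases List.mem_cons.mp ((hm x).mp List.mem_cons_self) with rfl | hx
        · rfl
        · rcases List.mem_cons.mp ((hm y).mpr List.mem_cons_self) with rfl | hy
          · rfl
          · exact absurd (hy2 x hx) (not_lt_of_gt (hx1 y hy))
      subst hxy
      congr 1
      refine ih ys hxs1 hys2 (fun c => ?_)
      constructor
      · intro hc
        rcases List.mem_cons.mp ((hm c).mp (List.mem_cons_of_mem _ hc)) with rfl | h
        · exact absurd (hx1 c hc) (lt_irrefl c)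
        · exact h
      · intro hc
        rcases List.mem_cons.mp ((hm c).mpr (List.mem_cons_of_mem _ hc)) with rfl | h
        · exact absurd (hy2 c hc) (lt_irrefl c)
        · exact h

-- pairs whose second component is f of the first: snd-projections and snd-filters factor through fst
theorem pv_map_snd_eq (l : List (Char × Int)) (f : Char → Int) (h : ∀ p ∈ l, p.2 = f p.1) :
    l.map Prod.snd = (l.map Prod.fst).map f := by
  induction l with
  | nil => rfl
  | cons p ps ih =>
    simp only [List.map_cons, h p List.mem_cons_self]
    rw [ih (fun q hq => h q (List.mem_cons_of_mem _ hq))]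

theorem pv_filter_snd_map_fst (l : List (Char × Int)) (f : Char → Int) (m : Int)
    (h : ∀ p ∈ l, p.2 = f p.1) :
    (l.filter (fun p => p.2 == m)).map Prod.fst = (l.map Prod.fst).filter (fun c => f c == m) := by
  induction l with
  | nil => rfl
  | cons p ps ih =>
    have hps := ih (fun q hq => h q (List.mem_cons_of_mem _ hq))
    by_cases hp : p.2 == m
    · have hf : (f p.1 == m) = true := by rw [← h p List.mem_cons_self]; exact hp
      simp [hp, hf, hps]
    · have hf : (f p.1 == m) = false := by
        rw [← h p List.mem_cons_self]; exact Bool.not_eq_true _ ▸ (by simpa using hp)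
      simp [hp, hf, hps]

-- ===== VERDICT (by name: the statement is the Claim_ definition above) =====
theorem leastFrequentLetters_spec : Claim_equal_leastFrequentLetters := by
  intro s _
  unfold Spec_leastFrequentLetters leastFrequentLetters leastFrequentLetters_alt
  simp only [pv_freq_eq, pv_min_fold]
  set t := PySem.Chars.lower s.toList with ht
  set L := t.filter PySem.Chars.isalpha with hL
  set S := PySem.List.sorted L (fun x => x) false with hS
  set alphabet := "abcdefghijklmnopqrstuvwxyz".toList with hA
  have hperm : S.Perm L := PySem.List.sorted_perm L (fun x => x) false
  have hcnt : ∀ c : Char, S.count c = L.count c := fun c => hperm.count_eq c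
  have hpw : S.Pairwise (· ≤ ·) := PySem.List.sorted_pairwise L (fun x => x)
  obtain ⟨hKpw, hKmem, hKcnt⟩ := pv_runs_spec S hpw
  have hKcnt' : ∀ p ∈ pvRuns S, p.2 = (fun c => (L.count c : Int)) p.1 := by
    intro p hp
    rw [hKcnt p hp]
    exact congrArg _ (hcnt p.1)
  have hKiff : ∀ c : Char, c ∈ (pvRuns S).map Prod.fst ↔ c ∈ L :=
    fun c => (hKmem c).trans hperm.mem_iff
  have halpha_mem : ∀ c : Char, c ∈ L → c ∈ alphabet := by
    intro c hcL
    rw [hL] at hcL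
    have h2 := List.mem_filter.mp hcL
    rw [hA]
    exact pv_mem_alphabet s.toList c (by rw [← ht]; exact h2.1) h2.2
  have hKeq : (pvRuns S).map Prod.fst = alphabet.filter (fun c => decide (c ∈ L)) := by
    refine pv_sorted_ext _ _ hKpw ?_ ?_
    · apply List.Pairwise.filter
      rw [hA]
      decide
    · intro c
      rw [List.mem_filter]
      simp only [decide_eq_true_eq]
      constructor
      · intro hc
        exact ⟨halpha_mem c ((hKiff c).mp hc), (hKiff c).mp hc⟩
      · intro h
        exact (hKiff c).mpr h.2
  by_cases hLnil : L = []
  · have hSnil : S = [] := by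
      rw [hS, hLnil]
      rfl
    rw [hLnil, hSnil]
    have h1 : (pvRuns ([] : List Char)).isEmpty = true := by
      rw [pvRuns.eq_def]
      rfl
    have h2 : (PySem.Dict.counter ([] : List Char) : PySem.Dict Char Int).items.isEmpty = true :=
      rfl
    simp [h1, h2]
  · obtain ⟨c0, hc0⟩ := List.exists_mem_of_ne_nil L hLnil
    have hSne : S ≠ [] := by
      intro h
      rw [hS] at h
      exact hLnil ((PySem.List.sorted_eq_nil_iff _ _ _).mp h)
    obtain ⟨s0, stl, hScons⟩ := List.exists_cons_of_ne_nil hSne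
    have hAempty : (PySem.Dict.counter L : PySem.Dict Char Int).items.isEmpty = false := by
      rw [PySem.Dict.items_counter]
      rcases hq : PySem.Set.ofList L with _ | ⟨a, as⟩
      · exact absurd ((PySem.Set.mem_ofList _ _).mpr hc0) (by rw [hq]; simp)
      · rfl
    have hBempty : (pvRuns S).isEmpty = false := by
      rw [hScons, pv_runs_cons]
      rfl
    rw [hAempty, hBempty]
    simp only [Bool.false_eq_true, if_false]
    have hV : (PySem.Dict.counter L : PySem.Dict Char Int).values
        = (PySem.Set.ofList L).map (fun k => (L.count k : Int)) := by
      simp [PySem.Dict.values, PySem.Dict.items_counter]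
    have hW : (pvRuns S).map Prod.snd
        = ((pvRuns S).map Prod.fst).map (fun c => (L.count c : Int)) :=
      pv_map_snd_eq _ _ hKcnt'
    have hVW : ∀ x : Int, x ∈ (PySem.Dict.counter L : PySem.Dict Char Int).values
        ↔ x ∈ (pvRuns S).map Prod.snd := by
      intro x
      rw [hV, hW]
      constructor
      · intro hx
        obtain ⟨k, hk, hke⟩ := List.mem_map.mp hx
        exact List.mem_map.mpr ⟨k, (hKiff k).mpr ((PySem.Set.mem_ofList _ _).mp hk), hke⟩
      · intro hx
        obtain ⟨k, hk, hke⟩ := List.mem_map.mp hx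
        exact List.mem_map.mpr ⟨k, (PySem.Set.mem_ofList _ _).mpr ((hKiff k).mp hk), hke⟩
    have hVne : (PySem.Dict.counter L : PySem.Dict Char Int).values ≠ [] := by
      intro h
      have hmem : (L.count c0 : Int) ∈ (PySem.Dict.counter L : PySem.Dict Char Int).values := by
        rw [hV]
        exact List.mem_map_of_mem ((PySem.Set.mem_ofList _ _).mpr hc0)
      rw [h] at hmem
      exact List.not_mem_nil hmem
    have hWne : (pvRuns S).map Prod.snd ≠ [] := by
      rw [hScons, pv_runs_cons]
      simp
    rcases hmv : PySem.List.min? (PySem.Dict.counter L : PySem.Dict Char Int).values id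
      with _ | ⟨mv⟩
    · exact absurd ((PySem.List.min?_eq_none_iff _ _).mp hmv) hVne
    rcases hmw : PySem.List.min? ((pvRuns S).map Prod.snd) (fun x => x) with _ | ⟨mw⟩
    · exact absurd ((PySem.List.min?_eq_none_iff _ _).mp hmw) hWne
    have hmveq : mv = mw := by
      have h1 : mv ≤ mw := PySem.List.min?_isMin hmv mw ((hVW mw).mpr (PySem.List.min?_mem hmw))
      have h2 : mw ≤ mv := PySem.List.min?_isMin hmw mv ((hVW mv).mp (PySem.List.min?_mem hmv))
      exact le_antisymm h1 h2
    subst hmveq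
    refine congrArg String.ofList ?_
    rw [PySem.List.foldl_append_if, List.nil_append,
      pv_filter_snd_map_fst (pvRuns S) (fun c => (L.count c : Int)) mv hKcnt',
      hKeq, List.filter_filter]
    rw [List.map_id']
    apply List.filter_congr
    intro c hc
    simp [PySem.Dict.contains_counter, PySem.Dict.getD_counter, Bool.and_comm]
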